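-- pv_equiv track=rewrite | github.com/13w13/humanitarian-secondary-data | scripts/fetch_country_data.py | _extract_date_range
-- ===== SOURCE A (Python) =====
-- def _extract_date_range(records, date_field='date_start'):
--     """Extract min/max dates from a list of record dicts."""
--     dates = []
--     for r in records:
--         d = r.get(date_field, '') or ''
--         if d:
--             dates.append(str(d)[:10])
--     if not dates:
--         return '', ''
--     return min(dates), max(dates)
-- ===== SOURCE B (Python) =====
-- def _extract_date_range(records, date_field='date_start'):
--     """Extract min/max dates from a list of record dicts (single pass, running extremes)."""
--     lo = None
--     hi = None
--     for r in records:
--         d = r.get(date_field, '') or ''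
--         if d:
--             s = str(d)[:10]
--             if lo is None or s < lo:
--                 lo = s
--             if hi is None or hi < s:
--                 hi = s
--     if lo is None:
--         return '', ''
--     return lo, hi
-- ===== Notes on version B (the rewrite author's own statement) =====
-- stated objective: alternative
-- what changed: Single pass maintaining running min/max (lo/hi) instead of materializing the filtered/truncated list and scanning it twice with min() and max().
import Mathlib
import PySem

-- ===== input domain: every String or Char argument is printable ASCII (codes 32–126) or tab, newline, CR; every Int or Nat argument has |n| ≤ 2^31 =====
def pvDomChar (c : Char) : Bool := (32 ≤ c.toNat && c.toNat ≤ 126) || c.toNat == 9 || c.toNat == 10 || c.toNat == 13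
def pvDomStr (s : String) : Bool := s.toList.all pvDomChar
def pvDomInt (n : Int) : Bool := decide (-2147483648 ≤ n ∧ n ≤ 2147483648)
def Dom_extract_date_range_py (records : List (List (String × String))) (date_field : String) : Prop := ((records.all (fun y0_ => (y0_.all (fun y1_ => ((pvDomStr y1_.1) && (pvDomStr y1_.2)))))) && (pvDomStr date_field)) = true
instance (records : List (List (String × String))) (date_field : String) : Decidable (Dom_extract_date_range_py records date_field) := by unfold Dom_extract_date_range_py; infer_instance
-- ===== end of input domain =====

-- B replaces A's build-list-then-min/max with a single pass keeping running extremes (alternative decomposition, same O(n) cost).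


-- ===== PORT A =====
-- dates.append(str(d)[:10]) loop, then min(dates), max(dates)  (str(d) is the identity: values are strings)
def extract_date_range_py (records : List (List (String × String))) (date_field : String) : String × String :=
  let dates : List String := records.foldl (fun dates r =>
    let d := (PySem.Dict.mk r).getD date_field ""    -- r.get(date_field, '') or '' (the 'or' is a no-op on strings)
    if d ≠ "" then dates ++ [PySem.Str.slice d none (some 10)] else dates) []
  match PySem.List.min? dates (fun x => x), PySem.List.max? dates (fun x => x) with
  | some lo, some hi => (lo, hi)
  | _, _ => ("", "")

-- ===== PORT B =====
-- single pass: lo/hi start at None, updated by strict comparisons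
def extract_date_range_py_alt (records : List (List (String × String))) (date_field : String) : String × String :=
  let st : Option String × Option String := records.foldl (fun st r =>
    let d := (PySem.Dict.mk r).getD date_field ""
    if d ≠ "" then
      let s := PySem.Str.slice d none (some 10)
      ((match st.1 with | none => some s | some lo => if s < lo then some s else some lo),
       (match st.2 with | none => some s | some hi => if hi < s then some s else some hi))
    else st) (none, none)
  match st with
  | (none, _) => ("", "")
  | (some lo, hi?) => (lo, hi?.getD "")

-- ===== PRECONDITION & SPEC =====
def Spec_extract_date_range_py (records : List (List (String × String))) (date_field : String) (out : String × String) : Prop := out = extract_date_range_py_alt records date_field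
instance (records : List (List (String × String))) (date_field : String) (out : String × String) : Decidable (Spec_extract_date_range_py records date_field out) := by unfold Spec_extract_date_range_py; infer_instance

-- ===== CLAIM (what is proved, stated in full; the proofs are below) =====
def Claim_equal_extract_date_range_py : Prop := ∀ (records : List (List (String × String))) (date_field : String), Dom_extract_date_range_py records date_field → Spec_extract_date_range_py records date_field (extract_date_range_py records date_field)

-- ===== LEMMAS AND PROOFS =====

-- the per-record contribution both ports share
def pvVal (date_field : String) (r : List (String × String)) : Option String :=
  let d := (PySem.Dict.mk r).getD date_field ""
  if d ≠ "" then some (PySem.Str.slice d none (some 10)) else none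

lemma aFold_eq (date_field : String) (rs : List (List (String × String))) :
    ∀ acc : List String,
      rs.foldl (fun dates r =>
        let d := (PySem.Dict.mk r).getD date_field ""
        if d ≠ "" then dates ++ [PySem.Str.slice d none (some 10)] else dates) acc
      = acc ++ rs.filterMap (pvVal date_field) := by
  induction rs with
  | nil => intro acc; simp
  | cons r t ih =>
    intro acc
    rw [List.foldl_cons, ih]
    simp only [List.filterMap_cons, pvVal]
    by_cases h : (PySem.Dict.mk r).getD date_field "" ≠ ""
    · simp [h]
    · simp [h]

def pvStep (st : Option String × Option String) (s : String) : Option String × Option String :=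
  ((match st.1 with | none => some s | some lo => if s < lo then some s else some lo),
   (match st.2 with | none => some s | some hi => if hi < s then some s else some hi))

lemma bFold_eq (date_field : String) (rs : List (List (String × String))) :
    ∀ st : Option String × Option String,
      rs.foldl (fun st r =>
        let d := (PySem.Dict.mk r).getD date_field ""
        if d ≠ "" then
          let s := PySem.Str.slice d none (some 10)
          ((match st.1 with | none => some s | some lo => if s < lo then some s else some lo),
           (match st.2 with | none => some s | some hi => if hi < s then some s else some hi))
        else st) st
      = (rs.filterMap (pvVal date_field)).foldl pvStep st := by
  induction rs with
  | nil => intro st; simp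
  | cons r t ih =>
    intro st
    rw [List.foldl_cons, ih]
    simp only [List.filterMap_cons, pvVal]
    by_cases h : (PySem.Dict.mk r).getD date_field "" ≠ ""
    · simp [h, pvStep]
    · simp [h]

lemma ite_min (a s : String) : (if s < a then s else a) = min a s := by
  by_cases h : s < a
  · simp [h, min_eq_right h.le]
  · simp [h, min_eq_left (not_lt.mp h)]

lemma ite_max (a s : String) : (if a < s then s else a) = max a s := by
  by_cases h : a < s
  · simp [h, max_eq_right h.le]
  · simp [h, max_eq_left (not_lt.mp h)]

lemma pvStep_some (lo hi s : String) :
    pvStep (some lo, some hi) s = (some (min lo s), some (max hi s)) := by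
  simp only [pvStep, ← apply_ite Option.some, ite_min, ite_max]

lemma stepFold_some (ds : List String) : ∀ lo hi : String,
    ds.foldl pvStep (some lo, some hi) = (some (ds.foldl min lo), some (ds.foldl max hi)) := by
  induction ds with
  | nil => intro lo hi; simp
  | cons s t ih =>
    intro lo hi
    rw [List.foldl_cons, pvStep_some, List.foldl_cons, List.foldl_cons]
    exact ih (min lo s) (max hi s)

-- ===== VERDICT (by name: the statement is the Claim_ definition above) =====
theorem extract_date_range_py_spec : Claim_equal_extract_date_range_py := by
  intro records date_field _
  unfold Spec_extract_date_range_py extract_date_range_py extract_date_range_py_alt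
  rw [aFold_eq, bFold_eq]
  simp only [List.nil_append]
  cases hds : records.filterMap (pvVal date_field) with
  | nil => simp [PySem.List.min?, PySem.List.max?]
  | cons d t =>
    rw [List.foldl_cons]
    have h0 : pvStep (none, none) d = (some d, some d) := rfl
    rw [h0, stepFold_some t d d, PySem.List.min?_id_cons, PySem.List.max?_id_cons]
    rfl
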